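-- pv_equiv track=rewrite | github.com/nobewan/pantry-pal | imx500_nanodet_onnx_inventory.py | compute_visible_inventory
-- ===== SOURCE A (Python) =====
-- def compute_visible_inventory(tracks):
--     inv = {}  # fruit -> {"fresh": n, "stale": n}
--     for tr in tracks.values():
--         fruit = tr.get("fruit")
--         quality = tr.get("quality")
--         if not fruit or not quality:
--             continue
--         rec = inv.setdefault(fruit, {"fresh": 0, "stale": 0})
--         if quality == "fresh":
--             rec["fresh"] += 1
--         else:
--             rec["stale"] += 1
--     return inv
-- ===== SOURCE B (Python) =====
-- def compute_visible_inventory(tracks):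
--     # Flat tally: one filtered pass collecting (fruit, is_fresh) pairs,
--     # then a reshape pass over the distinct fruits counting each bucket.
--     pairs = [(tr.get("fruit"), tr.get("quality") == "fresh")
--              for tr in tracks.values()
--              if tr.get("fruit") and tr.get("quality")]
--     fruits = list(dict.fromkeys(f for f, _ in pairs))
--     return {f: {"fresh": pairs.count((f, True)),
--                 "stale": pairs.count((f, False))}
--             for f in fruits}
-- ===== Notes on version B (the rewrite author's own statement) =====
-- stated objective: alternative
-- what changed: Replaces the incremental per-fruit nested-dict mutation (setdefault + in-place increment) with a flat tally: one filtered pass collecting (fruit, is_fresh) pairs, then a reshape pass over the distinct fruits that counts each bucket.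
import Mathlib
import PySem

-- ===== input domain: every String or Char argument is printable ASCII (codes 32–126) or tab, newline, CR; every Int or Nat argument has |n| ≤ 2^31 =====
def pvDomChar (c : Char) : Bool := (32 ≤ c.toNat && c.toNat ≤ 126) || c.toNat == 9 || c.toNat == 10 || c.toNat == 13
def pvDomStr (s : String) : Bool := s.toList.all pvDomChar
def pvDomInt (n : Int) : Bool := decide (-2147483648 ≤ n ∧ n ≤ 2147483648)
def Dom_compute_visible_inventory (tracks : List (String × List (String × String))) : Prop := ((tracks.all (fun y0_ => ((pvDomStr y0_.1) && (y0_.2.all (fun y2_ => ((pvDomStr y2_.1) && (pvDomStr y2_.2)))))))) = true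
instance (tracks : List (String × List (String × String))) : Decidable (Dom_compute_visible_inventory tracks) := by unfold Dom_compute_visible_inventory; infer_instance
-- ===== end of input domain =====

-- B replaces A's incremental nested-dict mutation by a flat (fruit, is_fresh) tally plus a
-- reshape pass over the distinct fruits (objective: alternative decomposition, same cost class).

-- ===== PORT A =====
def cviD0 : PySem.Dict String Int := PySem.Dict.ofList [("fresh", 0), ("stale", 0)]

def cviStep (inv : PySem.Dict String (PySem.Dict String Int)) (tr' : List (String × String)) :
    PySem.Dict String (PySem.Dict String Int) :=
  let tr := PySem.Dict.ofList tr'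
  match tr.get? "fruit", tr.get? "quality" with
  | some fruit, some quality =>
    -- 'not fruit or not quality' : a missing key (none) or the empty string is falsy
    if fruit = "" || quality = "" then inv
    else
      let inv1 := inv.setdefault fruit cviD0
      if quality = "fresh" then
        inv1.modify fruit cviD0 (fun r => r.modify "fresh" 0 (· + 1))
      else
        inv1.modify fruit cviD0 (fun r => r.modify "stale" 0 (· + 1))
  | _, _ => inv

def compute_visible_inventory (tracks : List (String × List (String × String))) :
    List (String × List (String × Int)) :=
  ((((PySem.Dict.ofList tracks).values).foldl cviStep PySem.Dict.empty).items).map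
    (fun p => (p.1, p.2.items))

-- ===== PORT B =====
def cviPair (tr' : List (String × String)) : Option (String × Bool) :=
  let tr := PySem.Dict.ofList tr'
  match tr.get? "fruit", tr.get? "quality" with
  | some f, some q => if f ≠ "" ∧ q ≠ "" then some (f, q == "fresh") else none
  | _, _ => none

def compute_visible_inventory_alt (tracks : List (String × List (String × String))) :
    List (String × List (String × Int)) :=
  let pairs := ((PySem.Dict.ofList tracks).values).filterMap cviPair
  let fruits := PySem.List.dedup (pairs.map (·.1))
  fruits.map (fun f =>
    (f, [("fresh", (pairs.count (f, true) : Int)), ("stale", (pairs.count (f, false) : Int))]))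

-- ===== PRECONDITION & SPEC =====
def Spec_compute_visible_inventory (tracks : List (String × List (String × String))) (out : List (String × List (String × Int))) : Prop := out = compute_visible_inventory_alt tracks
instance (tracks : List (String × List (String × String))) (out : List (String × List (String × Int))) : Decidable (Spec_compute_visible_inventory tracks out) := by unfold Spec_compute_visible_inventory; infer_instance

-- ===== CLAIM (what is proved, stated in full; the proofs are below) =====
def Claim_equal_compute_visible_inventory : Prop := ∀ (tracks : List (String × List (String × String))), Dom_compute_visible_inventory tracks → Spec_compute_visible_inventory tracks (compute_visible_inventory tracks)

-- ===== LEMMAS AND PROOFS =====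

-- A's loop body restricted to the (fruit, is_fresh) information it actually uses,
-- and a closed form of A's accumulator after processing a pair list.
def cviStep' (inv : PySem.Dict String (PySem.Dict String Int)) (p : String × Bool) :
    PySem.Dict String (PySem.Dict String Int) :=
  (inv.setdefault p.1 cviD0).modify p.1 cviD0
    (fun r => r.modify (if p.2 then "fresh" else "stale") 0 (· + 1))
lemma cviStep_eq (inv : PySem.Dict String (PySem.Dict String Int)) (tr' : List (String × String)) :
    cviStep inv tr' = match cviPair tr' with
      | none => inv
      | some p => cviStep' inv p := by
  unfold cviStep cviPair cviStep'
  cases h1 : (PySem.Dict.ofList tr').get? "fruit" <;>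
    cases h2 : (PySem.Dict.ofList tr').get? "quality" <;> simp only [h1, h2]
  case some.some f q =>
    by_cases hf : f = "" <;> by_cases hq : q = "" <;> simp only [hf, hq] <;> try simp
    by_cases hfr : q = "fresh" <;> simp [hfr, hq, hf]

lemma cviFold_filterMap (trs : List (List (String × String)))
    (inv : PySem.Dict String (PySem.Dict String Int)) :
    trs.foldl cviStep inv = (trs.filterMap cviPair).foldl cviStep' inv := by
  induction trs generalizing inv with
  | nil => rfl
  | cons t ts ih =>
    rw [List.foldl_cons, cviStep_eq, List.filterMap_cons]
    cases cviPair t <;> simp [ih]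

def cviRec (f : String) (qs : List (String × Bool)) : PySem.Dict String Int :=
  PySem.Dict.mk [("fresh", (qs.count (f, true) : Int)), ("stale", (qs.count (f, false) : Int))]

def cviAcc (qs : List (String × Bool)) : PySem.Dict String (PySem.Dict String Int) :=
  PySem.Dict.mk ((PySem.List.dedup (qs.map Prod.fst)).map (fun f => (f, cviRec f qs)))

lemma bump_fresh (x y : Int) :
    (PySem.Dict.mk [("fresh",x),("stale",y)]).modify "fresh" 0 (· + 1)
      = PySem.Dict.mk [("fresh",x+1),("stale",y)] := by
  simp [PySem.Dict.modify, PySem.Dict.insert, PySem.Dict.getD, PySem.Dict.get?, PySem.Dict.contains]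

lemma bump_stale (x y : Int) :
    (PySem.Dict.mk [("fresh",x),("stale",y)]).modify "stale" 0 (· + 1)
      = PySem.Dict.mk [("fresh",x),("stale",y+1)] := by
  simp [PySem.Dict.modify, PySem.Dict.insert, PySem.Dict.getD, PySem.Dict.get?, PySem.Dict.contains]

lemma cviD0_eq : cviD0 = PySem.Dict.mk [("fresh",0),("stale",0)] := by decide

lemma keys_cviAcc (qs : List (String × Bool)) :
    (cviAcc qs).keys = PySem.List.dedup (qs.map Prod.fst) := by
  simp [cviAcc, PySem.Dict.keys, List.map_map]
  exact List.map_id _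

lemma contains_cviAcc (qs : List (String × Bool)) (f : String) :
    (cviAcc qs).contains f = decide (f ∈ PySem.List.dedup (qs.map Prod.fst)) := by
  rw [PySem.Dict.contains_eq_decide_mem_keys, keys_cviAcc]

lemma count_append_ne (qs : List (String × Bool)) (f f' : String) (b c : Bool) (h : f' ≠ f) :
    (qs ++ [(f, b)]).count (f', c) = qs.count (f', c) := by
  simp [List.count_append, Ne.symm h]

lemma cviRec_append_ne (qs : List (String × Bool)) (f f' : String) (b : Bool) (h : f' ≠ f) :
    cviRec f' (qs ++ [(f, b)]) = cviRec f' qs := by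
  simp [cviRec, count_append_ne _ _ _ _ _ h]

lemma cviRec_bump (qs : List (String × Bool)) (f : String) (b : Bool) :
    (cviRec f qs).modify (if b then "fresh" else "stale") 0 (· + 1) = cviRec f (qs ++ [(f, b)]) := by
  cases b <;>
    simp [cviRec, bump_fresh, bump_stale, List.count_append]

lemma cviStep'_acc (qs : List (String × Bool)) (p : String × Bool) :
    cviStep' (cviAcc qs) p = cviAcc (qs ++ [p]) := by
  obtain ⟨f, b⟩ := p
  have hded : PySem.List.dedup ((qs ++ [(f, b)]).map Prod.fst)
      = PySem.Set.add (PySem.List.dedup (qs.map Prod.fst)) f := by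
    simp [PySem.List.dedup_eq_ofList, PySem.Set.ofList_append, PySem.Set.update]
  by_cases hf : f ∈ PySem.List.dedup (qs.map Prod.fst)
  · -- fruit already present: setdefault is the identity, the record is replaced in place
    have hc : (cviAcc qs).contains f = true := by
      rw [contains_cviAcc]; exact decide_eq_true hf
    have hmem : (f, cviRec f qs) ∈ (cviAcc qs).items := by
      simp only [cviAcc]
      exact List.mem_map.2 ⟨f, hf, rfl⟩
    have hgetD : (cviAcc qs).getD f cviD0 = cviRec f qs :=
      PySem.Dict.getD_of_mem_items _ hmem (keys_cviAcc qs ▸ PySem.List.nodup_dedup _) _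
    have hset : (cviAcc qs).setdefault f cviD0 = cviAcc qs :=
      PySem.Dict.setdefault_of_contains _ _ hc
    have hadd : PySem.Set.add (PySem.List.dedup (qs.map Prod.fst)) f
        = PySem.List.dedup (qs.map Prod.fst) := by
      simp only [PySem.Set.add, PySem.Set.contains, List.contains_iff_mem.2 hf, if_true]
    apply PySem.Dict.ext
    rw [cviStep', hset, PySem.Dict.modify, hgetD,
      PySem.Dict.items_insert_of_contains _ _ hc]
    simp only [cviAcc, hded, hadd, List.map_map]
    apply List.map_congr_left
    intro f' hf'
    by_cases hff : f' = f
    · subst hff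
      simp [cviRec_bump]
    · simp only [Function.comp]
      rw [cviRec_append_ne _ _ _ _ hff]
      simp [hff]
  · -- new fruit: setdefault appends a zero record, which is then bumped in place
    have hc : (cviAcc qs).contains f = false := by
      rw [contains_cviAcc]; exact decide_eq_false hf
    have hset : (cviAcc qs).setdefault f cviD0
        = PySem.Dict.mk ((cviAcc qs).items ++ [(f, cviD0)]) := by
      simp [PySem.Dict.setdefault, hc]
    have hkeys1 : (PySem.Dict.mk ((cviAcc qs).items ++ [(f, cviD0)])).keys
        = PySem.List.dedup (qs.map Prod.fst) ++ [f] := by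
      simp only [PySem.Dict.keys, List.map_append]
      rw [← PySem.Dict.keys, keys_cviAcc]
      rfl
    have hnd1 : (PySem.Dict.mk ((cviAcc qs).items ++ [(f, cviD0)])).keys.Nodup := by
      rw [hkeys1, List.nodup_append]
      refine ⟨PySem.List.nodup_dedup _, List.nodup_singleton _, ?_⟩
      intro a ha c hc
      rw [List.mem_singleton] at hc
      subst hc
      exact fun h => hf (h ▸ ha)
    have hmem1 : (f, cviD0) ∈ (PySem.Dict.mk ((cviAcc qs).items ++ [(f, cviD0)])).items :=
      List.mem_append_right _ (List.mem_singleton.2 rfl)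
    have hgetD : (PySem.Dict.mk ((cviAcc qs).items ++ [(f, cviD0)])).getD f cviD0 = cviD0 :=
      PySem.Dict.getD_of_mem_items _ hmem1 hnd1 _
    have hc1 : (PySem.Dict.mk ((cviAcc qs).items ++ [(f, cviD0)])).contains f = true := by
      rw [PySem.Dict.contains_eq_decide_mem_keys, hkeys1]
      simp
    have hadd : PySem.Set.add (PySem.List.dedup (qs.map Prod.fst)) f
        = PySem.List.dedup (qs.map Prod.fst) ++ [f] := by
      have : (PySem.List.dedup (qs.map Prod.fst)).contains f = false :=
        Bool.eq_false_iff.2 (fun hc => hf (List.contains_iff_mem.1 hc))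
      simp only [PySem.Set.add, PySem.Set.contains, this, Bool.false_eq_true, if_false]
    have hnot : ∀ c : Bool, qs.count (f, c) = 0 := by
      intro c
      refine List.count_eq_zero.2 ?_
      intro hmem
      exact hf ((PySem.List.mem_dedup _ _).2 (List.mem_map.2 ⟨(f, c), hmem, rfl⟩))
    have hbump : cviD0.modify (if b then "fresh" else "stale") 0 (· + 1)
        = cviRec f (qs ++ [(f, b)]) := by
      have h1 : cviRec f qs = cviD0 := by
        rw [cviD0_eq]
        simp [cviRec, hnot]
      rw [← h1, cviRec_bump]
    apply PySem.Dict.ext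
    rw [cviStep', hset, PySem.Dict.modify, hgetD,
      PySem.Dict.items_insert_of_contains _ _ hc1]
    have hrhs : (cviAcc (qs ++ [(f, b)])).items
        = (PySem.List.dedup (qs.map Prod.fst)).map (fun f' => (f', cviRec f' (qs ++ [(f, b)])))
          ++ [(f, cviRec f (qs ++ [(f, b)]))] := by
      simp only [cviAcc]
      rw [hded, hadd, List.map_append]
      rfl
    rw [hrhs, List.map_append]
    congr 1
    · simp only [cviAcc, List.map_map]
      apply List.map_congr_left
      intro f' hf'
      have hff : f' ≠ f := fun h => hf (h ▸ hf')
      simp only [Function.comp]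
      rw [cviRec_append_ne _ _ _ _ hff]
      simp [hff]
    · simp [hbump]

lemma cviFold_acc (ps qs : List (String × Bool)) :
    ps.foldl cviStep' (cviAcc qs) = cviAcc (qs ++ ps) := by
  induction ps generalizing qs with
  | nil => simp
  | cons p ps ih =>
    simp only [List.foldl_cons, cviStep'_acc, ih]
    simp

-- ===== VERDICT (by name: the statement is the Claim_ definition above) =====
theorem compute_visible_inventory_spec : Claim_equal_compute_visible_inventory := by
  intro tracks _
  unfold Spec_compute_visible_inventory compute_visible_inventory compute_visible_inventory_alt
  rw [cviFold_filterMap]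
  have h0 : (PySem.Dict.empty : PySem.Dict String (PySem.Dict String Int)) = cviAcc [] := rfl
  rw [h0, cviFold_acc]
  simp [cviAcc, cviRec, List.map_map, Function.comp]
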